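-- pv_equiv track=rewrite | github.com/JoyGames-TW/DRL_HW1 | app.py | to_grid_action_matrix
-- ===== SOURCE A (Python) =====
-- from typing import Dict, List, Optional, Set, Tuple
--
-- Action = str
--
-- State = Tuple[int, int]
--
-- def to_grid_action_matrix(
--     n: int,
--     policy: Dict[State, Optional[Action]],
--     start: State,
--     end: State,
--     obstacles: Set[State],
-- ) -> List[List[str]]:
--     matrix: List[List[str]] = []
--
--     for r in range(n):
--         row: List[str] = []
--         for c in range(n):
--             s = (r, c)
--             if s in obstacles:
--                 row.append("X")
--             elif s == start:
--                 row.append("S")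
--             elif s == end:
--                 row.append("E")
--             else:
--                 row.append(policy.get(s) or "")
--         matrix.append(row)
--
--     return matrix
-- ===== SOURCE B (Python) =====
-- def to_grid_action_matrix(n, policy, start, end, obstacles):
--     # Phase 1: full grid of policy defaults; Phase 2: stamp E, S, X in
--     # reverse-priority order (obstacle > start > end wins last).
--     matrix = [[(policy.get((r, c)) or "") for c in range(n)] for r in range(n)]
--
--     def stamp(pos, sym):
--         r, c = pos
--         if 0 <= r < n and 0 <= c < n:
--             matrix[r][c] = sym
--
--     stamp(end, "E")
--     stamp(start, "S")
--     for o in obstacles: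
--         stamp(o, "X")
--     return matrix
-- ===== Notes on version B (the rewrite author's own statement) =====
-- stated objective: alternative
-- what changed: B builds the whole grid from policy defaults in one comprehension and then stamps E, S and the obstacles over it in reverse-priority order with bounds-checked writes, instead of A's per-cell priority branch inside the nested loops.
import Mathlib
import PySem

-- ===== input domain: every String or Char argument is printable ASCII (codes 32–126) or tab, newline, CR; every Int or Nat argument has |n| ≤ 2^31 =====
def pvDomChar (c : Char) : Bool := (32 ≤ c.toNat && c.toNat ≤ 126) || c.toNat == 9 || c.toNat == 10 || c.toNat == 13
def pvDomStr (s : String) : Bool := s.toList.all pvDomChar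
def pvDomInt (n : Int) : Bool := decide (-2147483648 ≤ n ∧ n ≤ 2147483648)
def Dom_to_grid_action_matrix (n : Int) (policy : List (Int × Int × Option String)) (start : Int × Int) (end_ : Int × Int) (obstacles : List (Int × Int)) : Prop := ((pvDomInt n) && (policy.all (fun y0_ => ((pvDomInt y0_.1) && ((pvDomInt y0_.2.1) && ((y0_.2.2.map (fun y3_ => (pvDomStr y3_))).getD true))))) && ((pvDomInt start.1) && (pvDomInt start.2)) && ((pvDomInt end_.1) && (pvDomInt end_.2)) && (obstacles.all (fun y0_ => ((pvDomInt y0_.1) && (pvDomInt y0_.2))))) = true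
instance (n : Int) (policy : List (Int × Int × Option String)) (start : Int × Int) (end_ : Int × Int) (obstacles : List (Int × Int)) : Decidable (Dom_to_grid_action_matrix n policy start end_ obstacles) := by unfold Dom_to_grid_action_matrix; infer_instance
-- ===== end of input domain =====

-- B builds the full grid of policy defaults, then stamps E, S and the obstacles over it
-- in reverse-priority order with bounds-checked writes (alternative decomposition, same cost class).
-- ===== PORT A =====
def to_grid_action_matrix (n : Int) (policy : List (Int × Int × Option String)) (start : Int × Int) (end_ : Int × Int) (obstacles : List (Int × Int)) : List (List String) :=
  let d := PySem.Dict.ofList (policy.map (fun p => ((p.1, p.2.1), p.2.2)))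
  (PySem.List.pyRange 0 n 1).foldl (fun matrix r =>
    matrix ++ [(PySem.List.pyRange 0 n 1).foldl (fun row c =>
      row ++ [if (r, c) ∈ obstacles then "X"
              else if (r, c) = start then "S"
              else if (r, c) = end_ then "E"
              else ((d.getD (r, c) none).getD "")]) []]) []

-- ===== PORT B =====
-- bounds-checked single-cell write (B's `stamp` helper)
def pvStamp (n : Int) (m : List (List String)) (pos : Int × Int) (sym : String) : List (List String) :=
  if 0 ≤ pos.1 ∧ pos.1 < n ∧ 0 ≤ pos.2 ∧ pos.2 < n then
    m.set pos.1.toNat ((m.getD pos.1.toNat []).set pos.2.toNat sym)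
  else m

def to_grid_action_matrix_alt (n : Int) (policy : List (Int × Int × Option String)) (start : Int × Int) (end_ : Int × Int) (obstacles : List (Int × Int)) : List (List String) :=
  let d := PySem.Dict.ofList (policy.map (fun p => ((p.1, p.2.1), p.2.2)))
  let base := (PySem.List.pyRange 0 n 1).map (fun r => (PySem.List.pyRange 0 n 1).map (fun c =>
      ((d.getD (r, c) none).getD "")))
  obstacles.foldl (fun m o => pvStamp n m o "X") (pvStamp n (pvStamp n base end_ "E") start "S")

-- ===== PRECONDITION & SPEC =====
def Spec_to_grid_action_matrix (n : Int) (policy : List (Int × Int × Option String)) (start : Int × Int) (end_ : Int × Int) (obstacles : List (Int × Int)) (out : List (List String)) : Prop := out = to_grid_action_matrix_alt n policy start end_ obstacles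
instance (n : Int) (policy : List (Int × Int × Option String)) (start : Int × Int) (end_ : Int × Int) (obstacles : List (Int × Int)) (out : List (List String)) : Decidable (Spec_to_grid_action_matrix n policy start end_ obstacles out) := by unfold Spec_to_grid_action_matrix; infer_instance

-- ===== CLAIM (what is proved, stated in full; the proofs are below) =====
def Claim_equal_to_grid_action_matrix : Prop := ∀ (n : Int) (policy : List (Int × Int × Option String)) (start : Int × Int) (end_ : Int × Int) (obstacles : List (Int × Int)), Dom_to_grid_action_matrix n policy start end_ obstacles → Spec_to_grid_action_matrix n policy start end_ obstacles (to_grid_action_matrix n policy start end_ obstacles)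

-- ===== LEMMAS AND PROOFS =====

-- a foldl that appends one element per step is a map
theorem pv_foldl_append_map {α β : Type} (l : List α) (f : α → β) (init : List β) :
    l.foldl (fun acc x => acc ++ [f x]) init = init ++ l.map f := by
  induction l generalizing init with
  | nil => simp
  | cons x xs ih => simp [List.foldl_cons, ih]

-- stamping a cell on an n×n grid given cell-wise equals updating the cell function
theorem pv_stamp_on_grid (n : Int) (g : Int → Int → String) (pos : Int × Int) (sym : String) :
    pvStamp n ((PySem.List.pyRange 0 n 1).map (fun r => (PySem.List.pyRange 0 n 1).map (g r))) pos sym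
      = (PySem.List.pyRange 0 n 1).map (fun r => (PySem.List.pyRange 0 n 1).map
          (fun c => if (r, c) = pos then sym else g r c)) := by
  unfold pvStamp
  by_cases h : 0 ≤ pos.1 ∧ pos.1 < n ∧ 0 ≤ pos.2 ∧ pos.2 < n
  · rw [if_pos h]
    obtain ⟨h1, h2, h3, h4⟩ := h
    apply List.ext_getElem
    · simp
    · intro k hk hk'
      simp only [List.length_set, List.length_map, PySem.List.length_pyRange_one] at hk
      rw [List.getElem_set, List.getElem_map, List.getElem_map,
        PySem.List.getElem_pyRange_one]
      by_cases hkr : pos.1.toNat = k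
      · rw [if_pos hkr]
        have hrk : (0 : Int) + (k : Int) = pos.1 := by omega
        have hgetD : ((PySem.List.pyRange 0 n 1).map (fun r => (PySem.List.pyRange 0 n 1).map (g r))).getD pos.1.toNat [] = (PySem.List.pyRange 0 n 1).map (g pos.1) := by
          rw [List.getD_eq_getElem?_getD, List.getElem?_map, PySem.List.getElem?_pyRange_one,
            if_pos (by omega)]
          simp only [Option.map_some, Option.getD_some]
          have hcast : (0 : Int) + (pos.1.toNat : Int) = pos.1 := by omega
          rw [hcast]
        rw [hgetD, hrk]
        apply List.ext_getElem
        · simp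
        · intro j hj hj'
          simp only [List.length_set, List.length_map, PySem.List.length_pyRange_one] at hj
          rw [List.getElem_set, List.getElem_map, List.getElem_map,
            PySem.List.getElem_pyRange_one]
          by_cases hjc : pos.2.toNat = j
          · rw [if_pos hjc, if_pos (by cases pos with | mk a b => simp_all; omega)]
          · rw [if_neg hjc, if_neg (by cases pos with | mk a b => simp_all; omega)]
      · rw [if_neg hkr]
        apply List.map_congr_left
        intro c hc
        rw [if_neg (by cases pos with | mk a b => simp_all; omega)]
  · rw [if_neg h]
    apply List.map_congr_left
    intro r hr
    apply List.map_congr_left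
    intro c hc
    rw [PySem.List.mem_pyRange_one] at hr hc
    rw [if_neg (by cases pos with | mk a b => simp_all; omega)]

-- folding the obstacle stamps over a cell-wise grid
theorem pv_stamp_fold (n : Int) (obs : List (Int × Int)) (g : Int → Int → String) :
    obs.foldl (fun m o => pvStamp n m o "X")
        ((PySem.List.pyRange 0 n 1).map (fun r => (PySem.List.pyRange 0 n 1).map (g r)))
      = (PySem.List.pyRange 0 n 1).map (fun r => (PySem.List.pyRange 0 n 1).map
          (fun c => if (r, c) ∈ obs then "X" else g r c)) := by
  induction obs generalizing g with
  | nil => simp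
  | cons o os ih =>
    rw [List.foldl_cons, pv_stamp_on_grid, ih]
    apply List.map_congr_left
    intro r _
    apply List.map_congr_left
    intro c _
    by_cases h1 : (r, c) = o <;> by_cases h2 : (r, c) ∈ os <;>
      simp [List.mem_cons, h1, h2]

-- ===== VERDICT (by name: the statement is the Claim_ definition above) =====
theorem to_grid_action_matrix_spec : Claim_equal_to_grid_action_matrix := by
  intro n policy start end_ obstacles _
  unfold Spec_to_grid_action_matrix to_grid_action_matrix to_grid_action_matrix_alt
  simp only [pv_foldl_append_map, List.nil_append, pv_stamp_on_grid, pv_stamp_fold]
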